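-- pv_equiv track=rewrite | github.com/pypi-data/pypi-mirror-12 | packages/pemjh/pemjh-0.0.1.zip/pemjh-0.0.1/src/pemjh/challenge173/__init__.py | numOfSquares
-- ===== SOURCE A (Python) =====
-- def numOfSquares(bits):
--     nSquares = 0
--     holeWidth = 1
--     while 1:
--         # Get area of hole
--         holeArea = holeWidth**2
--
--         if (4 * holeWidth + 4) > bits:
--             return nSquares
--
--         # Try surrounding Sizes
--         surroundingWidth = holeWidth + 2
--
--         while 1:
--             # Get total area
--             totalArea = surroundingWidth**2
--
--             # Get surrounding area
--             surroundingArea = totalArea - holeArea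
--
--             if surroundingArea > bits:
--                 break
--
--             surroundingWidth += 2
--             nSquares += 1
--
--         holeWidth += 1
-- ===== SOURCE B (Python) =====
-- def numOfSquares(bits):
--     # Count laminae by number of layers m instead of by hole width:
--     # a lamina with hole width h and m layers uses 4*m*(m+h) bits, so for each m
--     # the admissible hole widths are 1 <= h <= bits//(4*m) - m (a closed form).
--     total = 0
--     m = 1
--     while 4 * m * (m + 1) <= bits:
--         total += bits // (4 * m) - m
--         m += 1
--     return total
-- ===== Notes on version B (the rewrite author's own statement) =====
-- stated objective: faster
-- what changed: B counts laminae by layers m instead of simulating widths: for each m it adds the closed-form count bits//(4m)-m of admissible hole widths, replacing A's nested while loops by a single O(sqrt(bits)) loop.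
import Mathlib
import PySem

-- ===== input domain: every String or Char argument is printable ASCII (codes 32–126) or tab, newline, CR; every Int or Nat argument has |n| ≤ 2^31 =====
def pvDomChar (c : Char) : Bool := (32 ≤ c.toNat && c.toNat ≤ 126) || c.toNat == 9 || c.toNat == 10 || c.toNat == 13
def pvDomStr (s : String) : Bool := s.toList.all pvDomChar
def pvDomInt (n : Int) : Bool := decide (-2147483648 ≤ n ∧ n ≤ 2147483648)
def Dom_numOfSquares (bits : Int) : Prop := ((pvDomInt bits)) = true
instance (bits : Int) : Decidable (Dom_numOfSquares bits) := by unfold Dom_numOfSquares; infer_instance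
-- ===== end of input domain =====

-- ===== PORT A =====
-- B counts by layers with a closed-form per-layer count instead of A's nested width loops.
-- Both while-loops are ported as structural recursion on a fuel of bits.toNat + 1 steps,
-- which lemmas pvInner_eq_sum / pvOuter_eq_sum below show is always enough (totality guard only).

-- inner while-loop of A: counts surrounding widths while surroundingArea ≤ bits
def numOfSquaresInner (bits holeArea : Int) (fuel : Nat) (surroundingWidth nSquares : Int) : Int :=
  match fuel with
  | 0 => nSquares
  | fuel + 1 =>
    if surroundingWidth * surroundingWidth - holeArea > bits then nSquares
    else numOfSquaresInner bits holeArea fuel (surroundingWidth + 2) (nSquares + 1)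

-- outer while-loop of A
def numOfSquaresOuter (bits : Int) (fuel : Nat) (holeWidth nSquares : Int) : Int :=
  match fuel with
  | 0 => nSquares
  | fuel + 1 =>
    if 4 * holeWidth + 4 > bits then nSquares
    else numOfSquaresOuter bits fuel (holeWidth + 1)
          (numOfSquaresInner bits (holeWidth * holeWidth) (bits.toNat + 1) (holeWidth + 2) nSquares)

def numOfSquares (bits : Int) : Int := numOfSquaresOuter bits (bits.toNat + 1) 1 0

-- ===== PORT B =====
-- loop of B over the layer count m (same fuel device for totality)
def numOfSquaresAltLoop (bits : Int) (fuel : Nat) (m total : Int) : Int :=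
  match fuel with
  | 0 => total
  | fuel + 1 =>
    if 4 * m * (m + 1) ≤ bits then
      numOfSquaresAltLoop bits fuel (m + 1) (total + (PySem.Int.floordiv bits (4 * m) - m))
    else total

def numOfSquares_alt (bits : Int) : Int := numOfSquaresAltLoop bits (bits.toNat + 1) 1 0

-- ===== PRECONDITION & SPEC =====
def Spec_numOfSquares (bits : Int) (out : Int) : Prop := out = numOfSquares_alt bits
instance (bits : Int) (out : Int) : Decidable (Spec_numOfSquares bits out) := by unfold Spec_numOfSquares; infer_instance

-- ===== CLAIM (what is proved, stated in full; the proofs are below) =====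
def Claim_equal_numOfSquares : Prop := ∀ (bits : Int), Dom_numOfSquares bits → Spec_numOfSquares bits (numOfSquares bits)

-- ===== LEMMAS AND PROOFS =====

-- indicator of the pair (h, m): a lamina with hole width h and m layers uses 4*m*(m+h) bits
def pvInd (b : Int) (h m : Nat) : Int :=
  if 4 * (m : Int) * ((m : Int) + (h : Int)) ≤ b then 1 else 0

lemma pvInner_eq_sum (b : Int) (h : Nat) (hh : 1 ≤ h) :
    ∀ fuel k acc, 1 ≤ k → b.toNat + 1 - k ≤ fuel →
      numOfSquaresInner b ((h : Int) * h) fuel ((h : Int) + 2 * k) acc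
        = acc + ∑ m ∈ Finset.Icc k b.toNat, pvInd b h m := by
  intro fuel
  induction fuel with
  | zero =>
    intro k acc hk hd
    rw [numOfSquaresInner, Finset.Icc_eq_empty (by omega), Finset.sum_empty, add_zero]
  | succ d ih =>
    intro k acc hk hd
    have hh' : (1:Int) ≤ (h:Int) := by exact_mod_cast hh
    have hk' : (1:Int) ≤ (k:Int) := by exact_mod_cast hk
    by_cases hg : 4*(k:Int)*((k:Int)+(h:Int)) ≤ b
    · have hcond : ¬ (((h:Int)+2*k)*((h:Int)+2*k) - (h:Int)*(h:Int) > b) := by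
        rw [not_lt]; nlinarith
      rw [numOfSquaresInner, if_neg hcond]
      have hkN : k ≤ b.toNat := by
        have h4 : 4*(k:Int) ≤ 4*(k:Int)*((k:Int)+(h:Int)) := by nlinarith
        omega
      have hstep : ((h:Int) + 2*k) + 2 = (h:Int) + 2*((k+1 : Nat) : Int) := by
        push_cast; ring
      rw [hstep, ih (k+1) (acc+1) (by omega) (by omega)]
      have hins : Finset.Icc k b.toNat = insert k (Finset.Icc (k+1) b.toNat) := by
        ext x; simp only [Finset.mem_Icc, Finset.mem_insert]; omega
      rw [hins, Finset.sum_insert (by simp)]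
      have hone : pvInd b h k = 1 := by simp [pvInd, hg]
      rw [hone]; ring
    · rw [not_le] at hg
      have hcond : ((h:Int)+2*k)*((h:Int)+2*k) - (h:Int)*(h:Int) > b := by nlinarith
      rw [numOfSquaresInner, if_pos hcond]
      have hz : ∑ m ∈ Finset.Icc k b.toNat, pvInd b h m = 0 := by
        apply Finset.sum_eq_zero
        intro m hm
        have hkm : k ≤ m := (Finset.mem_Icc.mp hm).1
        have hkm' : (k:Int) ≤ (m:Int) := by exact_mod_cast hkm
        have : ¬ (4*(m:Int)*((m:Int)+(h:Int)) ≤ b) := by rw [not_le]; nlinarith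
        simp [pvInd, this]
      rw [hz, add_zero]

lemma pvOuter_eq_sum (b : Int) :
    ∀ fuel h acc, 1 ≤ h → b.toNat + 1 - h ≤ fuel →
      numOfSquaresOuter b fuel (h : Nat) acc
        = acc + ∑ h' ∈ Finset.Icc h b.toNat, ∑ m ∈ Finset.Icc 1 b.toNat, pvInd b h' m := by
  intro fuel
  induction fuel with
  | zero =>
    intro h acc hh hd
    rw [numOfSquaresOuter, Finset.Icc_eq_empty (by omega), Finset.sum_empty, add_zero]
  | succ d ih =>
    intro h acc hh hd
    by_cases hguard : 4 * (h:Int) + 4 > b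
    · rw [numOfSquaresOuter, if_pos hguard]
      have hz : ∑ h' ∈ Finset.Icc h b.toNat, ∑ m ∈ Finset.Icc 1 b.toNat, pvInd b h' m = 0 := by
        apply Finset.sum_eq_zero
        intro h' hh'
        apply Finset.sum_eq_zero
        intro m hm
        have h1 : h ≤ h' := (Finset.mem_Icc.mp hh').1
        have h2 : 1 ≤ m := (Finset.mem_Icc.mp hm).1
        have h1' : (h:Int) ≤ (h':Int) := by exact_mod_cast h1
        have h2' : (1:Int) ≤ (m:Int) := by exact_mod_cast h2
        have hh0 : (1:Int) ≤ (h:Int) := by exact_mod_cast hh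
        have : ¬ (4*(m:Int)*((m:Int)+(h':Int)) ≤ b) := by rw [not_le]; nlinarith
        simp [pvInd, this]
      rw [hz, add_zero]
    · rw [not_lt] at hguard
      rw [numOfSquaresOuter, if_neg (by omega)]
      have hhN : h ≤ b.toNat := by omega
      have hone : ((h:Int) + 2) = (h:Int) + 2*((1:Nat):Int) := by push_cast; ring
      rw [hone, pvInner_eq_sum b h hh (b.toNat + 1) 1 acc le_rfl (by omega)]
      have hcast : (h:Int) + 1 = ((h+1 : Nat) : Int) := by push_cast; ring
      rw [hcast, ih (h+1) _ (by omega) (by omega)]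
      have hins : Finset.Icc h b.toNat = insert h (Finset.Icc (h+1) b.toNat) := by
        ext x; simp only [Finset.mem_Icc, Finset.mem_insert]; omega
      rw [hins, Finset.sum_insert (by simp)]
      ring

lemma pvCol_eq (b : Int) (m : Nat) (hm : 1 ≤ m) (hg : 4 * (m:Int) * ((m:Int) + 1) ≤ b) :
    ∑ h ∈ Finset.Icc 1 b.toNat, pvInd b h m
      = PySem.Int.floordiv b (4 * m) - m := by
  have hm' : (1:Int) ≤ (m:Int) := by exact_mod_cast hm
  have hpos : (0:Int) < 4 * (m:Int) := by linarith
  set Q := PySem.Int.floordiv b (4 * (m:Int)) with hQdef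
  have hQ1 : (m:Int) + 1 ≤ Q := by
    rw [hQdef, PySem.Int.le_floordiv_iff_mul_le hpos]; nlinarith
  have hb8 : (8:Int) ≤ b := by nlinarith
  have hQb : Q ≤ b := by
    rw [hQdef, PySem.Int.floordiv_eq_ediv_of_pos hpos]
    exact Int.ediv_le_self _ (by omega)
  have hiff : ∀ hh : Nat, (4*(m:Int)*((m:Int)+(hh:Int)) ≤ b) ↔ ((hh:Int) ≤ Q - m) := by
    intro hh
    have e : 4*(m:Int)*((m:Int)+(hh:Int)) = ((m:Int)+(hh:Int))*(4*(m:Int)) := by ring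
    rw [e, ← PySem.Int.le_floordiv_iff_mul_le hpos, ← hQdef]
    omega
  have hsum : ∑ h ∈ Finset.Icc 1 b.toNat, pvInd b h m
      = ∑ h ∈ Finset.Icc 1 b.toNat, (if (h:Int) ≤ Q - m then (1:Int) else 0) := by
    apply Finset.sum_congr rfl
    intro h _
    simp only [pvInd, hiff h]
  rw [hsum]
  have hfil : (Finset.Icc 1 b.toNat).filter (fun h : Nat => (h:Int) ≤ Q - m)
      = Finset.Icc 1 (Q - m).toNat := by
    ext x; simp only [Finset.mem_filter, Finset.mem_Icc]; omega
  rw [Finset.sum_boole, hfil, Nat.card_Icc]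
  omega

lemma pvAlt_eq_sum (b : Int) :
    ∀ fuel m acc, 1 ≤ m → b.toNat + 1 - m ≤ fuel →
      numOfSquaresAltLoop b fuel (m : Nat) acc
        = acc + ∑ m' ∈ Finset.Icc m b.toNat, ∑ h ∈ Finset.Icc 1 b.toNat, pvInd b h m' := by
  intro fuel
  induction fuel with
  | zero =>
    intro m acc hm hd
    rw [numOfSquaresAltLoop, Finset.Icc_eq_empty (by omega), Finset.sum_empty, add_zero]
  | succ d ih =>
    intro m acc hm hd
    have hm' : (1:Int) ≤ (m:Int) := by exact_mod_cast hm
    by_cases hg : 4 * (m:Int) * ((m:Int) + 1) ≤ b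
    · rw [numOfSquaresAltLoop, if_pos hg]
      have hmN : m ≤ b.toNat := by
        have h4 : 4*(m:Int) ≤ 4*(m:Int)*((m:Int)+1) := by nlinarith
        omega
      have hcast : (m:Int) + 1 = ((m+1 : Nat) : Int) := by push_cast; ring
      rw [hcast, ih (m+1) _ (by omega) (by omega)]
      have hins : Finset.Icc m b.toNat = insert m (Finset.Icc (m+1) b.toNat) := by
        ext x; simp only [Finset.mem_Icc, Finset.mem_insert]; omega
      rw [hins, Finset.sum_insert (by simp), pvCol_eq b m hm hg]
      ring
    · rw [numOfSquaresAltLoop, if_neg hg]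
      rw [not_le] at hg
      have hz : ∑ m' ∈ Finset.Icc m b.toNat, ∑ h ∈ Finset.Icc 1 b.toNat, pvInd b h m' = 0 := by
        apply Finset.sum_eq_zero
        intro m1 hm1
        apply Finset.sum_eq_zero
        intro h hh
        have h1 : m ≤ m1 := (Finset.mem_Icc.mp hm1).1
        have h2 : 1 ≤ h := (Finset.mem_Icc.mp hh).1
        have h1' : (m:Int) ≤ (m1:Int) := by exact_mod_cast h1
        have h2' : (1:Int) ≤ (h:Int) := by exact_mod_cast h2
        have : ¬ (4*(m1:Int)*((m1:Int)+(h:Int)) ≤ b) := by rw [not_le]; nlinarith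
        simp [pvInd, this]
      rw [hz, add_zero]

-- ===== VERDICT (by name: the statement is the Claim_ definition above) =====
theorem numOfSquares_spec : Claim_equal_numOfSquares := by
  intro bits _
  unfold Spec_numOfSquares numOfSquares numOfSquares_alt
  have hA := pvOuter_eq_sum bits (bits.toNat + 1) 1 0 le_rfl (by omega)
  have hB := pvAlt_eq_sum bits (bits.toNat + 1) 1 0 le_rfl (by omega)
  push_cast at hA hB
  rw [hA, hB, Finset.sum_comm]
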